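-- pv_equiv track=rewrite | github.com/sebastianlhw/parsfet | src/parsfet/comparators/cell_diff.py | _same_function_type
-- ===== SOURCE A (Python) =====
-- def _same_function_type(name_a: str, name_b: str) -> bool:
--     """Checks if two cell names likely represent the same logical function."""
--     function_types = [
--         "INV",
--         "BUF",
--         "NAND",
--         "NOR",
--         "AND",
--         "OR",
--         "XOR",
--         "XNOR",
--         "MUX",
--         "AOI",
--         "OAI",
--         "DFF",
--         "LATCH",
--         "SDFF",
--         "DLAT",
--     ]
--
--     for func in function_types:
--         a_has = func in name_a.upper()
--         b_has = func in name_b.upper()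
--         if a_has and b_has:
--             return True
--
--     return False
-- ===== SOURCE B (Python) =====
-- def _same_function_type(name_a: str, name_b: str) -> bool:
--     """Checks if two cell names likely represent the same logical function."""
--     function_types = [
--         "INV", "BUF", "NAND", "NOR", "AND", "OR", "XOR", "XNOR",
--         "MUX", "AOI", "OAI", "DFF", "LATCH", "SDFF", "DLAT",
--     ]
--
--     def type_mask(name: str) -> int:
--         # Bitmask of function types occurring in the name: scan every start
--         # position of the uppercased name and test each keyword with startswith.
--         u = name.upper()
--         m = 0
--         for i in range(len(u)):
--             for k, func in enumerate(function_types):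
--                 if u.startswith(func, i):
--                     m |= 1 << k
--         return m
--
--     return type_mask(name_a) & type_mask(name_b) != 0
-- ===== Notes on version B (the rewrite author's own statement) =====
-- stated objective: alternative
-- what changed: Replaces per-keyword substring membership tests ('func in name.upper()') with a position-wise scan of each uppercased name that tests startswith at every offset and accumulates the matched type indices as an integer bitmask, then decides the answer by bitwise AND of the two masks.
import Mathlib
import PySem

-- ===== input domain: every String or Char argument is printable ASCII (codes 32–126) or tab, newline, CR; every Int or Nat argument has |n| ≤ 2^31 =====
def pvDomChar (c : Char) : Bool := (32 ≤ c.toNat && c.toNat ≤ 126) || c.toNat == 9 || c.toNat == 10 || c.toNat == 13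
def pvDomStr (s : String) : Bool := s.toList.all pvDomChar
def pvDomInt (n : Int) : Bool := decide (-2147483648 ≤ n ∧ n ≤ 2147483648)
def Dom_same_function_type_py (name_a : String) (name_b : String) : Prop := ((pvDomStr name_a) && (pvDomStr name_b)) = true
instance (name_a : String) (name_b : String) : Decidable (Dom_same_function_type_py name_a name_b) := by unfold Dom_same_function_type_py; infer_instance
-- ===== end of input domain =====

-- B replaces per-keyword substring membership tests with a position-wise startswith scan
-- of each uppercased name accumulating matched type indices as an integer bitmask,
-- then decides by bitwise AND of the two masks (alternative algorithm, same result).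

def pvFunctionTypes : List String :=
  ["INV", "BUF", "NAND", "NOR", "AND", "OR", "XOR", "XNOR",
   "MUX", "AOI", "OAI", "DFF", "LATCH", "SDFF", "DLAT"]

-- ===== PORT A =====
-- the for loop with early return, recomputing .upper() each iteration as A does
def sftLoopA (fs : List String) (name_a name_b : String) : Bool :=
  match fs with
  | [] => false
  | func :: rest =>
    let a_has := PySem.Str.isIn func (PySem.Str.upper name_a)
    let b_has := PySem.Str.isIn func (PySem.Str.upper name_b)
    if a_has && b_has then true else sftLoopA rest name_a name_b

def same_function_type_py (name_a : String) (name_b : String) : Bool :=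
  sftLoopA pvFunctionTypes name_a name_b

-- ===== PORT B =====
-- type_mask: u = name.upper(); for i in range(len(u)): for k, func in enumerate(function_types):
--   if u.startswith(func, i): m |= 1 << k       (u.startswith(func, i) = func is a prefix of u[i:])
def sftMask (name : String) : Nat :=
  let u := (PySem.Str.upper name).toList
  (List.range u.length).foldl (fun m i =>
    (PySem.List.enumerate pvFunctionTypes).foldl (fun m kf =>
      if PySem.Chars.startswith (u.drop i) kf.2.toList then m ||| (1 <<< kf.1.toNat) else m) m) 0

def same_function_type_py_alt (name_a : String) (name_b : String) : Bool :=
  sftMask name_a &&& sftMask name_b != 0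

-- ===== PRECONDITION & SPEC =====
def Spec_same_function_type_py (name_a : String) (name_b : String) (out : Bool) : Prop := out = same_function_type_py_alt name_a name_b
instance (name_a : String) (name_b : String) (out : Bool) : Decidable (Spec_same_function_type_py name_a name_b out) := by unfold Spec_same_function_type_py; infer_instance

-- ===== CLAIM =====
def Claim_equal_same_function_type_py : Prop := ∀ (name_a : String) (name_b : String), Dom_same_function_type_py name_a name_b → Spec_same_function_type_py name_a name_b (same_function_type_py name_a name_b)

-- ===== LEMMAS AND PROOFS =====

theorem sftLoopA_iff (fs : List String) (a b : String) :
    sftLoopA fs a b = true ↔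
      ∃ f ∈ fs, PySem.Str.isIn f (PySem.Str.upper a) = true ∧
                PySem.Str.isIn f (PySem.Str.upper b) = true := by
  induction fs with
  | nil => simp [sftLoopA]
  | cons f rest ih =>
    simp only [sftLoopA]
    split_ifs with h
    · simp only [Bool.and_eq_true] at h
      simp only [true_iff]
      exact ⟨f, List.mem_cons_self, h.1, h.2⟩
    · rw [ih]
      constructor
      · rintro ⟨g, hg, hga, hgb⟩; exact ⟨g, List.mem_cons_of_mem _ hg, hga, hgb⟩
      · rintro ⟨g, hg, hga, hgb⟩
        rcases List.mem_cons.mp hg with rfl | hg'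
        · exact absurd (by rw [hga, hgb]; rfl) h
        · exact ⟨g, hg', hga, hgb⟩

theorem testBit_one_shiftLeft (n k : Nat) : (1 <<< n).testBit k = (n == k) := by
  rw [Nat.shiftLeft_eq, one_mul, Nat.testBit_two_pow]
  exact Eq.symm (Bool.beq_eq_decide_eq n k)

theorem exists_testBit_of_ne_zero (n : Nat) (h : n ≠ 0) : ∃ i, n.testBit i = true := by
  by_contra hc
  push Not at hc
  exact h (Nat.eq_of_testBit_eq (fun i => by simp [Bool.eq_false_iff.mpr (hc i)]))

-- inner fold over enumerate: which bits get set
theorem testBit_inner (ps : List (Int × String)) (d : List Char) (m : Nat) (k : Nat) :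
    ((ps.foldl (fun m kf =>
        if PySem.Chars.startswith d kf.2.toList then m ||| (1 <<< kf.1.toNat) else m) m).testBit k)
    = (m.testBit k || ps.any (fun kf => kf.1.toNat == k && PySem.Chars.startswith d kf.2.toList)) := by
  induction ps generalizing m with
  | nil => simp
  | cons p rest ih =>
    simp only [List.foldl_cons, List.any_cons, ih]
    split_ifs with h
    · rw [Nat.testBit_or, testBit_one_shiftLeft]
      simp [h, Bool.or_assoc, Bool.or_comm, Bool.or_left_comm]
    · simp [h]

theorem testBit_sftMask (name : String) (k : Nat) :
    (sftMask name).testBit k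
    = ((List.range (PySem.Str.upper name).toList.length).any (fun i =>
        (PySem.List.enumerate pvFunctionTypes).any (fun kf =>
          kf.1.toNat == k &&
          PySem.Chars.startswith ((PySem.Str.upper name).toList.drop i) kf.2.toList))) := by
  unfold sftMask
  generalize (PySem.Str.upper name).toList = u
  have H : ∀ (is : List Nat) (m : Nat),
      ((is.foldl (fun m i =>
        (PySem.List.enumerate pvFunctionTypes).foldl (fun m kf =>
          if PySem.Chars.startswith (u.drop i) kf.2.toList then m ||| (1 <<< kf.1.toNat) else m) m) m).testBit k)
      = (m.testBit k || is.any (fun i =>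
          (PySem.List.enumerate pvFunctionTypes).any (fun kf =>
            kf.1.toNat == k && PySem.Chars.startswith (u.drop i) kf.2.toList))) := by
    intro is
    induction is with
    | nil => simp
    | cons i rest ih =>
      intro m
      simp only [List.foldl_cons, List.any_cons, ih, testBit_inner, Bool.or_assoc]
  simpa using H (List.range u.length) 0

-- for a nonempty pattern: some in-range start position has it as a prefix ↔ it is an infix
theorem exists_drop_prefix_iff (f u : List Char) (hf : f ≠ []) :
    (∃ i, i < u.length ∧ f <+: u.drop i) ↔ f <:+: u := by
  constructor
  · rintro ⟨i, _, t, ht⟩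
    exact ⟨u.take i, t, by rw [List.append_assoc, ht, List.take_append_drop]⟩
  · rintro ⟨s, t, hst⟩
    have hdrop : u.drop s.length = f ++ t := by
      rw [← hst, List.append_assoc, List.drop_left]
    refine ⟨s.length, ?_, t, hdrop.symm⟩
    have hlen := congrArg List.length hst
    simp only [List.length_append] at hlen
    have hfpos : 0 < f.length := List.length_pos_iff.mpr hf
    omega

theorem mask_testBit_iff_isIn (name : String) (k : Nat) (f : String)
    (hk : pvFunctionTypes[k]? = some f) :
    ((sftMask name).testBit k) = PySem.Str.isIn f (PySem.Str.upper name) := by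
  have hklt : k < pvFunctionTypes.length := (List.getElem?_eq_some_iff.mp hk).1
  have hgf : pvFunctionTypes[k] = f := (List.getElem?_eq_some_iff.mp hk).2
  have hf : f.toList ≠ [] := by
    have hne : ∀ g ∈ pvFunctionTypes, g.toList ≠ [] := by decide
    exact hne f (List.mem_of_getElem? hk)
  rw [testBit_sftMask, Bool.eq_iff_iff, List.any_eq_true]
  rw [PySem.Str.isIn_iff_infix, ← exists_drop_prefix_iff _ _ hf]
  constructor
  · rintro ⟨i, hi, h⟩
    rw [List.any_eq_true] at h
    obtain ⟨kf, hmem, hkf⟩ := h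
    rw [PySem.List.mem_enumerate_iff] at hmem
    obtain ⟨j, hj, rfl⟩ := hmem
    simp only [Bool.and_eq_true, beq_iff_eq] at hkf
    have hje : j = k := by
      have := hkf.1
      simpa using this
    subst hje
    refine ⟨i, List.mem_range.mp hi, ?_⟩
    rw [hgf] at hkf
    exact (PySem.Chars.startswith_iff _ _).mp hkf.2
  · rintro ⟨i, hi, hpre⟩
    refine ⟨i, List.mem_range.mpr hi, ?_⟩
    rw [List.any_eq_true]
    refine ⟨((0 : Int) + k, pvFunctionTypes[k]), (PySem.List.mem_enumerate_iff _ _ _).mpr ⟨k, hklt, rfl⟩, ?_⟩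
    simp only [Bool.and_eq_true, beq_iff_eq]
    refine ⟨by simp, ?_⟩
    rw [hgf]
    exact (PySem.Chars.startswith_iff _ _).mpr hpre

theorem mask_testBit_false_of_ge (name : String) (k : Nat)
    (hk : pvFunctionTypes.length ≤ k) : (sftMask name).testBit k = false := by
  rw [testBit_sftMask, Bool.eq_false_iff]
  intro h
  rw [List.any_eq_true] at h
  obtain ⟨i, _, h⟩ := h
  rw [List.any_eq_true] at h
  obtain ⟨kf, hmem, hkf⟩ := h
  rw [PySem.List.mem_enumerate_iff] at hmem
  obtain ⟨j, hj, rfl⟩ := hmem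
  simp only [Bool.and_eq_true, beq_iff_eq] at hkf
  have : j = k := by simpa using hkf.1
  omega

theorem alt_iff (a b : String) :
    same_function_type_py_alt a b = true ↔
      ∃ f ∈ pvFunctionTypes, PySem.Str.isIn f (PySem.Str.upper a) = true ∧
                             PySem.Str.isIn f (PySem.Str.upper b) = true := by
  unfold same_function_type_py_alt
  rw [bne_iff_ne]
  constructor
  · intro h
    obtain ⟨k, hbit⟩ := exists_testBit_of_ne_zero _ h
    rw [Nat.testBit_and, Bool.and_eq_true] at hbit
    by_cases hklt : k < pvFunctionTypes.length
    · have hk : pvFunctionTypes[k]? = some pvFunctionTypes[k] := List.getElem?_eq_getElem hklt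
      refine ⟨pvFunctionTypes[k], List.getElem_mem hklt, ?_, ?_⟩
      · rw [← mask_testBit_iff_isIn a k _ hk]; exact hbit.1
      · rw [← mask_testBit_iff_isIn b k _ hk]; exact hbit.2
    · exfalso
      have := mask_testBit_false_of_ge a k (by omega)
      rw [this] at hbit
      exact Bool.false_ne_true hbit.1
  · rintro ⟨f, hmem, ha, hb⟩
    obtain ⟨k, hklt, hgf⟩ := List.mem_iff_getElem.mp hmem
    have hk : pvFunctionTypes[k]? = some f := by
      rw [List.getElem?_eq_getElem hklt, hgf]
    intro hzero
    have hbit : (sftMask a &&& sftMask b).testBit k = true := by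
      rw [Nat.testBit_and, Bool.and_eq_true,
          mask_testBit_iff_isIn a k f hk, mask_testBit_iff_isIn b k f hk]
      exact ⟨ha, hb⟩
    rw [hzero] at hbit
    simp at hbit

-- ===== VERDICT =====
theorem same_function_type_py_spec : Claim_equal_same_function_type_py := by
  intro a b _
  unfold Spec_same_function_type_py same_function_type_py
  rw [Bool.eq_iff_iff, sftLoopA_iff, alt_iff]
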